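-- pv_equiv track=rewrite | github.com/jacob-thompson/advent-of-code | 2024/day2.py | get_counter
-- ===== SOURCE A (Python) =====
-- def increasing(report):
--     return all(x < y and y - x <= 3 for x, y in zip(report, report[1:]))
--
-- def decreasing(report):
--     return all(x > y and x - y <= 3 for x, y in zip(report, report[1:]))
--
-- def fixable(report):
--     index = 0
--
--     for number in report:
--         fixed = report[:]
--         fixed.pop(index)
--
--         if increasing(fixed) or decreasing(fixed):
--             return True
--
--         index += 1
--
--     return False
--
-- def get_counter(reports, try_fixing = False):
--     counter = 0
--
--     for report in reports:
--         if increasing(report) or decreasing(report):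
--             counter += 1
--         elif try_fixing and fixable(report):
--             counter += 1
--
--     return counter
-- ===== SOURCE B (Python) =====
-- def get_counter(reports, try_fixing = False):
--     # O(R*n): instead of trying every one-element removal, only the two removals
--     # around the first violating pair of each direction can possibly help.
--     def mono(r, lo, hi):
--         return all(lo <= b - a <= hi for a, b in zip(r, r[1:]))
--
--     def first_bad(r, lo, hi):
--         for i, (a, b) in enumerate(zip(r, r[1:])):
--             if not (lo <= b - a <= hi):
--                 return i
--         return None
--
--     def fix_dir(r, lo, hi):
--         i = first_bad(r, lo, hi)
--         if i is None:
--             return True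
--         return mono(r[:i] + r[i+1:], lo, hi) or mono(r[:i+1] + r[i+2:], lo, hi)
--
--     counter = 0
--     for r in reports:
--         if mono(r, 1, 3) or mono(r, -3, -1):
--             counter += 1
--         elif try_fixing and (fix_dir(r, 1, 3) or fix_dir(r, -3, -1)):
--             counter += 1
--     return counter
-- ===== Notes on version B (the rewrite author's own statement) =====
-- stated objective: faster
-- what changed: A's dampener tries removing every one of the n elements and rescans each candidate; B locates the first violating adjacent pair of each direction and tests only the two removals around it, since removing any other element leaves that violating pair adjacent.
import Mathlib
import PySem

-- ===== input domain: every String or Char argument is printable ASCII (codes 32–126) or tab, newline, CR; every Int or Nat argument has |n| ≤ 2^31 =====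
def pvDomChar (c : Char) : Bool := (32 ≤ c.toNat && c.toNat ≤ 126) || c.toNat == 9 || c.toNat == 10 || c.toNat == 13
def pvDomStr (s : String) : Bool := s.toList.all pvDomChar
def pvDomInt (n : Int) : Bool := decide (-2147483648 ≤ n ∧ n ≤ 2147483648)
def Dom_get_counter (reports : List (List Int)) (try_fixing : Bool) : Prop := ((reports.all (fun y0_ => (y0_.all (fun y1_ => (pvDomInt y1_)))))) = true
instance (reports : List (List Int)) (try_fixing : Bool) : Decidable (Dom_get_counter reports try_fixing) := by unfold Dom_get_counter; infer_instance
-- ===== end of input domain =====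

-- B replaces A's try-every-removal dampener by checking only the two removals around the
-- first violating pair of each direction (objective: faster, O(R·n) instead of O(R·n²)).

-- ===== PORT A =====
-- report[1:] is a plain nonnegative slice, ported as List.drop 1 (exact here)
def increasing (report : List Int) : Bool :=
  (List.zip report (report.drop 1)).all (fun p => decide (p.1 < p.2 ∧ p.2 - p.1 ≤ 3))

def decreasing (report : List Int) : Bool :=
  (List.zip report (report.drop 1)).all (fun p => decide (p.1 > p.2 ∧ p.1 - p.2 ≤ 3))

-- 'for number in report' with a running index; fixed = report[:]; fixed.pop(index):
-- the index is always < len(report), so pop(index) yields exactly report.eraseIdx index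
def fixableAux (report : List Int) : List Int → Nat → Bool
  | [], _ => false
  | _ :: rest, index =>
    let fixed := report.eraseIdx index
    if increasing fixed || decreasing fixed then true
    else fixableAux report rest (index + 1)

def fixable (report : List Int) : Bool := fixableAux report report 0

def get_counter (reports : List (List Int)) (try_fixing : Bool) : Int :=
  reports.foldl (fun counter report =>
    if increasing report || decreasing report then counter + 1
    else if try_fixing && fixable report then counter + 1
    else counter) 0

-- ===== PORT B =====
def monoB (r : List Int) (lo hi : Int) : Bool :=
  (List.zip r (r.drop 1)).all (fun p => decide (lo ≤ p.2 - p.1 ∧ p.2 - p.1 ≤ hi))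

-- the 'for i, (a, b) in enumerate(zip(r, r[1:]))' loop of first_bad
def firstBadAux (lo hi : Int) : List (Int × Int) → Nat → Option Nat
  | [], _ => none
  | p :: rest, i =>
    if ¬ (lo ≤ p.2 - p.1 ∧ p.2 - p.1 ≤ hi) then some i else firstBadAux lo hi rest (i + 1)

def firstBad (r : List Int) (lo hi : Int) : Option Nat :=
  firstBadAux lo hi (List.zip r (r.drop 1)) 0

-- r[:i] + r[i+1:] and r[:i+1] + r[i+2:] are nonnegative slices: take/drop is exact
def fixDir (r : List Int) (lo hi : Int) : Bool :=
  match firstBad r lo hi with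
  | none => true
  | some i =>
      monoB (r.take i ++ r.drop (i + 1)) lo hi ||
      monoB (r.take (i + 1) ++ r.drop (i + 2)) lo hi

def get_counter_alt (reports : List (List Int)) (try_fixing : Bool) : Int :=
  reports.foldl (fun counter r =>
    if monoB r 1 3 || monoB r (-3) (-1) then counter + 1
    else if try_fixing && (fixDir r 1 3 || fixDir r (-3) (-1)) then counter + 1
    else counter) 0

-- ===== PRECONDITION & SPEC =====
def Spec_get_counter (reports : List (List Int)) (try_fixing : Bool) (out : Int) : Prop := out = get_counter_alt reports try_fixing
instance (reports : List (List Int)) (try_fixing : Bool) (out : Int) : Decidable (Spec_get_counter reports try_fixing out) := by unfold Spec_get_counter; infer_instance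

-- ===== CLAIM (what is proved, stated in full; the proofs are below) =====
def Claim_equal_get_counter : Prop := ∀ (reports : List (List Int)) (try_fixing : Bool), Dom_get_counter reports try_fixing → Spec_get_counter reports try_fixing (get_counter reports try_fixing)

-- ===== LEMMAS AND PROOFS =====

theorem zip_len (r : List Int) : (List.zip r (r.drop 1)).length = r.length - 1 := by
  simp

theorem zip_get (r : List Int) (j : Nat) (hj : j + 1 < r.length) :
    (List.zip r (r.drop 1))[j]'(by rw [zip_len]; omega) = (r[j], r[j + 1]) := by
  simp [List.getElem_zip]

theorem erase_get_lt (l : List Int) (i j : Nat) (h : j < (l.eraseIdx i).length) (hj : j < i) :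
    (l.eraseIdx i)[j] = l[j]'(by rw [List.length_eraseIdx] at h; split at h <;> omega) := by
  rw [List.getElem_eraseIdx]; simp [hj]

theorem erase_get_ge (l : List Int) (i j : Nat) (h : j < (l.eraseIdx i).length) (hj : i ≤ j) :
    (l.eraseIdx i)[j] = l[j + 1]'(by rw [List.length_eraseIdx] at h; split at h <;> omega) := by
  rw [List.getElem_eraseIdx]; simp [Nat.not_lt.mpr hj]

theorem mono_iff (r : List Int) (lo hi : Int) :
    monoB r lo hi = true ↔
      ∀ j (h : j + 1 < r.length), lo ≤ r[j + 1] - r[j] ∧ r[j + 1] - r[j] ≤ hi := by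
  unfold monoB
  rw [List.all_eq_true]
  constructor
  · intro h j hj
    have hm : (List.zip r (r.drop 1))[j]'(by rw [zip_len]; omega) ∈ List.zip r (r.drop 1) :=
      List.getElem_mem _
    have := h _ hm
    rw [zip_get r j hj] at this
    simpa using this
  · intro h p hp
    obtain ⟨j, hjl, hje⟩ := List.mem_iff_getElem.mp hp
    have hj : j + 1 < r.length := by have := hjl; rw [zip_len] at this; omega
    rw [zip_get r j hj] at hje
    subst hje
    simpa using h j hj

theorem increasing_eq (r : List Int) : increasing r = monoB r 1 3 := by
  unfold increasing monoB
  congr 1; funext p; exact decide_eq_decide.mpr (by omega)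

theorem decreasing_eq (r : List Int) : decreasing r = monoB r (-3) (-1) := by
  unfold decreasing monoB
  congr 1; funext p; exact decide_eq_decide.mpr (by omega)

theorem firstBadAux_none (lo hi : Int) (ps : List (Int × Int)) :
    ∀ (k : Nat), firstBadAux lo hi ps k = none →
    ∀ p ∈ ps, lo ≤ p.2 - p.1 ∧ p.2 - p.1 ≤ hi := by
  induction ps with
  | nil => intro k h p hp; cases hp
  | cons q rest ih =>
    intro k h p hp
    rw [firstBadAux] at h
    split at h
    · cases h
    · rcases List.mem_cons.mp hp with hp | hp
      · subst hp; by_contra hc; simp_all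
      · exact ih (k + 1) h p hp

theorem firstBadAux_some (lo hi : Int) (ps : List (Int × Int)) :
    ∀ (k f : Nat), firstBadAux lo hi ps k = some f →
    ∃ j, ∃ hj : j < ps.length, f = k + j ∧ ¬ (lo ≤ ps[j].2 - ps[j].1 ∧ ps[j].2 - ps[j].1 ≤ hi) := by
  induction ps with
  | nil => intro k f h; cases h
  | cons q rest ih =>
    intro k f h
    rw [firstBadAux] at h
    split at h
    · cases h
      exact ⟨0, by simp, by omega, by simpa using ‹¬ (lo ≤ q.2 - q.1 ∧ q.2 - q.1 ≤ hi)›⟩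
    · obtain ⟨j, hj, hf, hv⟩ := ih (k + 1) f h
      exact ⟨j + 1, by simpa using hj, by omega, by simpa using hv⟩

theorem firstBad_none (r : List Int) (lo hi : Int) (h : firstBad r lo hi = none) :
    monoB r lo hi = true := by
  unfold monoB
  rw [List.all_eq_true]
  intro p hp
  simpa using firstBadAux_none lo hi _ 0 h p hp

theorem firstBad_some (r : List Int) (lo hi : Int) (f : Nat) (h : firstBad r lo hi = some f) :
    ∃ hf : f + 1 < r.length,
      ¬ (lo ≤ r[f + 1] - r[f]'(Nat.lt_of_succ_lt hf) ∧
          r[f + 1] - r[f]'(Nat.lt_of_succ_lt hf) ≤ hi) := by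
  obtain ⟨j, hj, hfj, hv⟩ := firstBadAux_some lo hi _ 0 f h
  have hfj' : f = j := by omega
  subst hfj'
  have hjr : f + 1 < r.length := by have := hj; rw [zip_len] at this; omega
  refine ⟨hjr, ?_⟩
  rw [zip_get r f hjr] at hv
  simpa using hv

theorem only_neighbors (r : List Int) (lo hi : Int) (f : Nat)
    (hf : f + 1 < r.length)
    (hv : ¬ (lo ≤ r[f + 1] - r[f] ∧ r[f + 1] - r[f] ≤ hi)) (i : Nat)
    (hm : monoB (r.eraseIdx i) lo hi = true) : i = f ∨ i = f + 1 := by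
  by_contra hc
  rw [not_or] at hc
  obtain ⟨hif, hif1⟩ := hc
  by_cases hlen : i < r.length
  · have hel : (r.eraseIdx i).length = r.length - 1 := by
      rw [List.length_eraseIdx]; simp [hlen]
    rcases Nat.lt_or_ge i f with hlt | hge
    · -- i < f : the pair moves to (f-1, f) in the erased list
      have h1 : (f - 1) + 1 < (r.eraseIdx i).length := by omega
      have hmono := (mono_iff _ lo hi).mp hm (f - 1) h1
      have e1 : (r.eraseIdx i)[f - 1]'(by omega) = r[f]'(by omega) := by
        rw [erase_get_ge r i (f - 1) (by omega) (by omega)]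
        congr 1; omega
      have e2 : (r.eraseIdx i)[(f - 1) + 1]'(by omega) = r[f + 1]'hf := by
        rw [erase_get_ge r i ((f - 1) + 1) (by omega) (by omega)]
        congr 1; omega
      rw [e1, e2] at hmono
      exact hv hmono
    · -- f + 1 < i : the pair stays at (f, f+1)
      have hge' : f + 1 < i := by omega
      have h1 : f + 1 < (r.eraseIdx i).length := by omega
      have hmono := (mono_iff _ lo hi).mp hm f h1
      have e1 : (r.eraseIdx i)[f]'(by omega) = r[f]'(by omega) :=
        erase_get_lt r i f (by omega) (by omega)
      have e2 : (r.eraseIdx i)[f + 1]'(by omega) = r[f + 1]'hf :=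
        erase_get_lt r i (f + 1) (by omega) (by omega)
      rw [e1, e2] at hmono
      exact hv hmono
  · rw [List.eraseIdx_of_length_le (by omega)] at hm
    exact hv ((mono_iff r lo hi).mp hm f hf)

theorem fixableAux_iff (report : List Int) (rem : List Int) :
    ∀ (index : Nat), fixableAux report rem index = true ↔
      ∃ k, k < rem.length ∧
        (increasing (report.eraseIdx (index + k)) || decreasing (report.eraseIdx (index + k))) = true := by
  induction rem with
  | nil => intro index; simp [fixableAux]
  | cons a rest ih =>
    intro index
    rw [fixableAux]
    split
    next hcond =>
      simp only [true_iff]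
      exact ⟨0, by simp, by rw [Nat.add_zero]; exact hcond⟩
    next hcond =>
      rw [ih (index + 1)]
      constructor
      · rintro ⟨k, hk, hp⟩
        exact ⟨k + 1, by simpa using hk, by rw [show index + (k + 1) = index + 1 + k by omega]; exact hp⟩
      · rintro ⟨k, hk, hp⟩
        match k with
        | 0 => exact absurd (by rw [Nat.add_zero] at hp; exact hp) hcond
        | k' + 1 =>
          exact ⟨k', by simpa using hk, by rw [show index + 1 + k' = index + (k' + 1) by omega]; exact hp⟩

theorem fixDir_iff (r : List Int) (lo hi : Int) (hnm : monoB r lo hi = false) :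
    fixDir r lo hi = true ↔ ∃ i, i < r.length ∧ monoB (r.eraseIdx i) lo hi = true := by
  unfold fixDir
  cases hfb : firstBad r lo hi with
  | none => exact absurd (firstBad_none r lo hi hfb) (by simp [hnm])
  | some f =>
    obtain ⟨hf, hv⟩ := firstBad_some r lo hi f hfb
    show (monoB (r.take f ++ r.drop (f + 1)) lo hi ||
        monoB (r.take (f + 1) ++ r.drop (f + 2)) lo hi) = true ↔ _
    rw [← List.eraseIdx_eq_take_drop_succ, ← List.eraseIdx_eq_take_drop_succ]
    simp only [Bool.or_eq_true]
    constructor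
    · rintro (h | h)
      · exact ⟨f, by omega, h⟩
      · exact ⟨f + 1, by omega, h⟩
    · rintro ⟨i, hilen, h⟩
      rcases only_neighbors r lo hi f hf hv i h with rfl | rfl
      · exact Or.inl h
      · exact Or.inr h

theorem fixable_eq (r : List Int) (h13 : monoB r 1 3 = false) (h31 : monoB r (-3) (-1) = false) :
    fixable r = (fixDir r 1 3 || fixDir r (-3) (-1)) := by
  rw [Bool.eq_iff_iff]
  unfold fixable
  rw [fixableAux_iff r r 0]
  simp only [Bool.or_eq_true, increasing_eq, decreasing_eq, Nat.zero_add,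
    fixDir_iff r 1 3 h13, fixDir_iff r (-3) (-1) h31]
  constructor
  · rintro ⟨k, hk, h | h⟩
    · exact Or.inl ⟨k, hk, h⟩
    · exact Or.inr ⟨k, hk, h⟩
  · rintro (⟨k, hk, h⟩ | ⟨k, hk, h⟩)
    · exact ⟨k, hk, Or.inl h⟩
    · exact ⟨k, hk, Or.inr h⟩

theorem step_eq (try_fixing : Bool) (counter : Int) (r : List Int) :
    (if increasing r || decreasing r then counter + 1
     else if try_fixing && fixable r then counter + 1 else counter) =
    (if monoB r 1 3 || monoB r (-3) (-1) then counter + 1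
     else if try_fixing && (fixDir r 1 3 || fixDir r (-3) (-1)) then counter + 1 else counter) := by
  rw [increasing_eq, decreasing_eq]
  by_cases hs : (monoB r 1 3 || monoB r (-3) (-1)) = true
  · rw [if_pos hs, if_pos hs]
  · have h13 : monoB r 1 3 = false := by revert hs; cases monoB r 1 3 <;> simp
    have h31 : monoB r (-3) (-1) = false := by revert hs; cases monoB r (-3) (-1) <;> simp
    rw [fixable_eq r h13 h31]

-- ===== VERDICT (by name: the statement is the Claim_ definition above) =====
theorem get_counter_spec : Claim_equal_get_counter := by
  intro reports try_fixing _
  unfold Spec_get_counter get_counter get_counter_alt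
  congr 1; funext counter r; exact step_eq try_fixing counter r
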